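-- pv_equiv track=rewrite | github.com/itsnurislam/Project2 | main.py | Calc
-- ===== SOURCE A (Python) =====
-- def Calc(x):
--     d = 0
--     for i in range(x+1):
--         if i<10:
--             d = d + i
--         else:
--             hh = str(i)
--             h = list(hh)
--             d = d + int(h[0]) + int(h[1])
--     return d
-- ===== SOURCE B (Python) =====
-- def Calc(x):
--     # Digit-length bucketing: for large i the contribution depends only on the
--     # two leading digits t; each block of equal-length numbers is summed in closed form.
--     if x < 0:
--         return 0
--     if x < 10:
--         return x * (x + 1) // 2
--     total = 45  # sum of 0..9
--     p = 1
--     while 10 * p <= x: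
--         top = min(x, 100 * p - 1)
--         T = top // p  # two-digit prefix of the largest i in this block (10..99)
--         for t in range(10, T):
--             total += p * (t // 10 + t % 10)
--         total += (top - T * p + 1) * (T // 10 + T % 10)
--         p *= 10
--     return total
-- ===== Notes on version B (the rewrite author's own statement) =====
-- stated objective: faster
-- what changed: Replaces the per-integer loop with string digit extraction by digit-length bucketing: within each block of equal-length numbers the contribution depends only on the two-digit prefix, so each block is summed in closed form from at most ninety count-times-value terms.
import Mathlib
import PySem

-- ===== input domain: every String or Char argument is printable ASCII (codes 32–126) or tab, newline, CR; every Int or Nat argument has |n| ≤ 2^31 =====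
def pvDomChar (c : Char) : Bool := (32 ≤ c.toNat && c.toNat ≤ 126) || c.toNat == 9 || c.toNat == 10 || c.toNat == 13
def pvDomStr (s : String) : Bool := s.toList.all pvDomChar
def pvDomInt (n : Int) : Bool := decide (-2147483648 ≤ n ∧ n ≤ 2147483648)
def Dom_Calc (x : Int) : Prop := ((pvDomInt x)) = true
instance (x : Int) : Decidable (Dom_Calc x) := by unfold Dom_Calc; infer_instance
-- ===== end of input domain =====

-- B replaces A's per-integer loop with digit-length bucketing (closed-form block sums); objective: faster.

-- ===== PORT A =====
-- literal port of A's loop; the `.getD 0` defaults are unreachable (for i ≥ 10, str(i) has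
-- ≥ 2 characters and each is a decimal digit, so indexing and int() never raise)
def Calc (x : Int) : Int :=
  (PySem.List.pyRange 0 (x + 1) 1).foldl (fun d i =>
    if i < 10 then d + i
    else
      let hh := PySem.Int.toStr i
      let h := hh.toList
      d + ((PySem.List.pyGet? h 0).bind (fun c => PySem.Int.ofChars? [c])).getD 0
        + ((PySem.List.pyGet? h 1).bind (fun c => PySem.Int.ofChars? [c])).getD 0) 0

-- ===== PORT B =====
-- the while-loop of Source B; p is carried as a Nat with 0 < p (it is 10^k) for termination
def bLoop (x : Int) (p : Nat) (hp : 0 < p) (total : Int) : Int :=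
  if h : 10 * (p : Int) ≤ x then
    let top := min x (100 * (p : Int) - 1)
    let T := PySem.Int.floordiv top (p : Int)
    let total' := (PySem.List.pyRange 10 T 1).foldl
      (fun a t => a + (p : Int) * (PySem.Int.floordiv t 10 + PySem.Int.mod t 10)) total
    bLoop x (10 * p) (by omega)
      (total' + (top - T * (p : Int) + 1) * (PySem.Int.floordiv T 10 + PySem.Int.mod T 10))
  else total
termination_by x.toNat + 1 - p
decreasing_by omega

def Calc_alt (x : Int) : Int :=
  if x < 0 then 0
  else if x < 10 then PySem.Int.floordiv (x * (x + 1)) 2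
  else bLoop x 1 (by omega) 45

-- ===== PRECONDITION & SPEC =====
def Spec_Calc (x : Int) (out : Int) : Prop := out = Calc_alt x
instance (x : Int) (out : Int) : Decidable (Spec_Calc x out) := by unfold Spec_Calc; infer_instance

-- ===== CLAIM (what is proved, stated in full; the proofs are below) =====
def Claim_equal_Calc : Prop := ∀ (x : Int), Dom_Calc x → Spec_Calc x (Calc x)

-- ===== LEMMAS AND PROOFS =====

-- two-digit prefix of n (n itself if n < 100)
def pref2 (n : Nat) : Nat :=
  if h : n < 100 then n else pref2 (n / 10)
termination_by n
decreasing_by exact Nat.div_lt_self (by omega) (by omega)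

-- per-i contribution of A's loop, arithmetically
def g (n : Nat) : Int :=
  if n < 10 then (n : Int) else ((pref2 n / 10 : Nat) : Int) + ((pref2 n % 10 : Nat) : Int)

lemma pref2_bounds (n : Nat) (h : 10 ≤ n) : 10 ≤ pref2 n ∧ pref2 n < 100 := by
  induction n using Nat.strong_induction_on with
  | _ n ih =>
    rw [pref2]
    split
    · omega
    · exact ih (n / 10) (Nat.div_lt_self (by omega) (by omega)) (by omega)

lemma toDigitsCore_acc (f n : Nat) (l : List Char) :
    Nat.toDigitsCore 10 f n l = Nat.toDigitsCore 10 f n [] ++ l := by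
  induction f generalizing n l with
  | zero => simp [Nat.toDigitsCore]
  | succ f ih =>
    simp only [Nat.toDigitsCore]
    split
    · simp
    · rw [ih (n / 10) _, ih (n / 10) [_]]
      simp

lemma toDigitsCore_fuel (n : Nat) : ∀ f f', n < f → n < f' →
    Nat.toDigitsCore 10 f n [] = Nat.toDigitsCore 10 f' n [] := by
  induction n using Nat.strong_induction_on with
  | _ n ih =>
    intro f f' hf hf'
    obtain ⟨f, rfl⟩ : ∃ k, f = k + 1 := ⟨f - 1, by omega⟩
    obtain ⟨f', rfl⟩ : ∃ k, f' = k + 1 := ⟨f' - 1, by omega⟩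
    simp only [Nat.toDigitsCore]
    split
    · rfl
    · rename_i hne
      have hlt : n / 10 < n := Nat.div_lt_self (by omega) (by omega)
      rw [toDigitsCore_acc f, toDigitsCore_acc f',
        ih (n / 10) hlt f f' (by omega) (by omega)]

lemma toDigits_step (n : Nat) (h : 10 ≤ n) :
    Nat.toDigits 10 n = Nat.toDigits 10 (n / 10) ++ [Nat.digitChar (n % 10)] := by
  have hne : ¬ n / 10 = 0 := by
    intro h0; omega
  have hlt : n / 10 < n := Nat.div_lt_self (by omega) (by omega)
  simp only [Nat.toDigits, Nat.toDigitsCore, hne, if_false]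
  rw [toDigitsCore_acc, toDigitsCore_fuel (n / 10) n (n / 10 + 1) (by omega) (by omega)]
  simp only [Nat.toDigitsCore]

lemma toDigits_small (n : Nat) (h : n < 10) : Nat.toDigits 10 n = [Nat.digitChar n] := by
  interval_cases n <;> rfl

lemma toDigits_first2 (n : Nat) (h : 10 ≤ n) : ∃ rest,
    Nat.toDigits 10 n =
      Nat.digitChar (pref2 n / 10) :: Nat.digitChar (pref2 n % 10) :: rest := by
  induction n using Nat.strong_induction_on with
  | _ n ih =>
    by_cases h100 : n < 100
    · have hp : pref2 n = n := by rw [pref2, dif_pos h100]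
      refine ⟨[], ?_⟩
      rw [toDigits_step n h, toDigits_small (n / 10) (by omega), hp]
      rfl
    · have hp : pref2 n = pref2 (n / 10) := by rw [pref2, dif_neg h100]
      have hlt : n / 10 < n := Nat.div_lt_self (by omega) (by omega)
      obtain ⟨rest, hrest⟩ := ih (n / 10) hlt (by omega)
      refine ⟨rest ++ [Nat.digitChar (n % 10)], ?_⟩
      rw [toDigits_step n h, hrest, hp]
      rfl

lemma ofChars_digitChar (d : Nat) (h : d < 10) :
    PySem.Int.ofChars? [Nat.digitChar d] = some (d : Int) := by
  interval_cases d <;> decide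

-- A's loop body at i = ↑n equals d + g n
lemma body_eq_g (d : Int) (n : Nat) :
    (if (n : Int) < 10 then d + (n : Int)
     else
       let hh := PySem.Int.toStr (n : Int)
       let h := hh.toList
       d + ((PySem.List.pyGet? h 0).bind (fun c => PySem.Int.ofChars? [c])).getD 0
         + ((PySem.List.pyGet? h 1).bind (fun c => PySem.Int.ofChars? [c])).getD 0)
    = d + g n := by
  by_cases hn : n < 10
  · simp [g, hn, show (n : Int) < 10 by exact_mod_cast hn]
  · have h10 : 10 ≤ n := by omega
    have hnot : ¬ (n : Int) < 10 := by exact_mod_cast hn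
    obtain ⟨rest, hrest⟩ := toDigits_first2 n h10
    have hb := pref2_bounds n h10
    have hchars : (PySem.Int.toStr (n : Int)).toList = Nat.toDigits 10 n := by
      rw [PySem.Int.toList_toStr, PySem.Int.toChars]
      simp
    simp only [hnot, if_false, hchars, hrest]
    rw [PySem.List.pyGet?_zero_cons]
    rw [show (1 : Int) = ((1 : Nat) : Int) by rfl,
      PySem.List.pyGet?_ofNat _ 1 (by simp)]
    simp only [List.getElem_cons_succ, List.getElem_cons_zero, Option.bind_some]
    rw [ofChars_digitChar _ (by omega), ofChars_digitChar _ (by omega)]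
    simp [g, hn, add_assoc]

lemma foldl_range_g (N : Nat) (d : Int) :
    (List.range N).foldl
      (fun d i =>
        (if ((i : Nat) : Int) < 10 then d + ((i : Nat) : Int)
         else
           let hh := PySem.Int.toStr ((i : Nat) : Int)
           let h := hh.toList
           d + ((PySem.List.pyGet? h 0).bind (fun c => PySem.Int.ofChars? [c])).getD 0
             + ((PySem.List.pyGet? h 1).bind (fun c => PySem.Int.ofChars? [c])).getD 0)) d
    = d + ∑ i ∈ Finset.range N, g i := by
  induction N generalizing d with
  | zero => simp
  | succ N ih =>
    rw [List.range_succ, List.foldl_append, ih, Finset.sum_range_succ]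
    simp only [List.foldl_cons, List.foldl_nil, body_eq_g]
    ring

-- A computes the pointwise sum of g
lemma Calc_eq_sum (x : Int) (hx : 0 ≤ x) :
    Calc x = ∑ i ∈ Finset.range (x.toNat + 1), g i := by
  have hx1 : x + 1 = ((x.toNat + 1 : Nat) : Int) := by omega
  rw [Calc, hx1, PySem.List.pyRange_zero_natCast, List.foldl_map]
  rw [foldl_range_g (x.toNat + 1) 0]
  ring

-- f t = sum of the two digits of a two-digit number t
def fdig (t : Nat) : Int := ((t / 10 : Nat) : Int) + ((t % 10 : Nat) : Int)

lemma g_eq_fdig (p k i : Nat) (hp : p = 10 ^ k) (h1 : 10 * p ≤ i) (h2 : i < 100 * p) :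
    g i = fdig (i / p) := by
  have hpp : 0 < p := by subst hp; positivity
  have hpre : pref2 i = i / p := by
    clear hpp
    induction k generalizing p i with
    | zero =>
      subst hp
      rw [pref2]
      simp only [pow_zero] at h1 h2 ⊢
      rw [dif_pos (by omega)]
      omega
    | succ k ih =>
      subst hp
      have hge : ¬ i < 100 := by
        have : (100 : Nat) ≤ 10 * 10 ^ (k + 1) := by
          have : (1:Nat) ≤ 10 ^ k := Nat.one_le_pow _ _ (by omega)
          calc (100 : Nat) = 10 * (10 * 1) := by norm_num
          _ ≤ 10 * (10 * 10 ^ k) := by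
                exact Nat.mul_le_mul_left _ (Nat.mul_le_mul_left _ this)
          _ = 10 * 10 ^ (k + 1) := by ring
        omega
      rw [pref2, dif_neg hge]
      have h1' : 10 * 10 ^ k ≤ i / 10 := by
        rw [pow_succ] at h1
        omega
      have h2' : i / 10 < 100 * 10 ^ k := by
        rw [pow_succ] at h2
        omega
      rw [ih (10 ^ k) (i / 10) rfl h1' h2', Nat.div_div_eq_div_mul,
        pow_succ]
      ring_nf
  rw [g, if_neg (by omega), hpre, fdig]

-- bucketing identity: sum of f(i/p) over [10p, top] in B's block shape
lemma bucket (f : Nat → Int) (p : Nat) (hp : 0 < p) :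
    ∀ top (_h : 10 * p ≤ top),
      ∑ i ∈ Finset.Ico (10 * p) (top + 1), f (i / p)
        = (∑ t ∈ Finset.Ico 10 (top / p), (p : Int) * f t)
          + ((top % p : Nat) + 1) * f (top / p) := by
  intro top h
  induction top, h using Nat.le_induction with
  | base =>
    have hq : 10 * p / p = 10 := Nat.mul_div_cancel _ hp
    have hr : 10 * p % p = 0 := Nat.mul_mod_left _ _
    rw [Finset.sum_Ico_succ_top (le_refl _), hq, hr]
    simp
  | succ top htop ih =>
    have hq10 : 10 ≤ top / p := Nat.le_div_iff_mul_le hp |>.mpr (by omega)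
    have hdm := Nat.div_add_mod top p
    rw [Finset.sum_Ico_succ_top (by omega), ih]
    rcases Nat.lt_or_ge (top % p + 1) p with hlt | hge
    · have e : top + 1 = p * (top / p) + (top % p + 1) := by omega
      have hq : (top + 1) / p = top / p := by
        rw [e, Nat.mul_add_div hp, Nat.div_eq_of_lt hlt, Nat.add_zero]
      have hr : (top + 1) % p = top % p + 1 := by
        rw [e, Nat.mul_add_mod, Nat.mod_eq_of_lt hlt]
      rw [hq, hr]
      push_cast
      ring
    · have hrp : top % p + 1 = p := by
        have := Nat.mod_lt top hp
        omega
      have e : top + 1 = p * (top / p + 1) := by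
        have hr1 : p * (top / p + 1) = p * (top / p) + p := by ring
        omega
      have hq : (top + 1) / p = top / p + 1 := by
        rw [e, Nat.mul_div_cancel_left _ hp]
      have hr : (top + 1) % p = 0 := by
        rw [e, Nat.mul_mod_right]
      rw [hq, hr, Finset.sum_Ico_succ_top hq10]
      have hcast : ((top % p : Nat) : Int) + 1 = (p : Int) := by
        exact_mod_cast hrp
      rw [← hcast]
      push_cast
      ring

-- B's inner fold over pyRange 10 T computes the full-bucket sum
lemma foldl_pyRange_fdig (p : Nat) (total : Int) :
    ∀ T : Nat, 10 ≤ T →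
      (PySem.List.pyRange 10 (T : Int) 1).foldl
        (fun a t => a + (p : Int) * (PySem.Int.floordiv t 10 + PySem.Int.mod t 10)) total
      = total + ∑ t ∈ Finset.Ico 10 T, (p : Int) * fdig t := by
  intro T hT
  induction T, hT using Nat.le_induction with
  | base =>
    simp [PySem.List.pyRange]
  | succ T hT ih =>
    have hcast : ((T + 1 : Nat) : Int) = (T : Int) + 1 := by push_cast; ring
    rw [hcast, PySem.List.pyRange_one_succ_right (by exact_mod_cast hT),
      List.foldl_append, ih, Finset.sum_Ico_succ_top hT]
    simp only [List.foldl_cons, List.foldl_nil]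
    rw [show (10 : Int) = ((10 : Nat) : Int) by rfl, PySem.Int.floordiv_natCast,
      PySem.Int.mod_natCast]
    simp [fdig]
    ring

-- one block of B equals the pointwise sum of g over that block
lemma block_eq (x : Int) (p k : Nat) (hpk : p = 10 ^ k) (hpx : 10 * (p : Nat) ≤ x.toNat)
    (hx : 0 ≤ x) (total : Int) :
    (PySem.List.pyRange 10 (PySem.Int.floordiv (min x (100 * (p : Int) - 1)) (p : Int)) 1).foldl
        (fun a t => a + (p : Int) * (PySem.Int.floordiv t 10 + PySem.Int.mod t 10)) total
      + (min x (100 * (p : Int) - 1)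
          - PySem.Int.floordiv (min x (100 * (p : Int) - 1)) (p : Int) * (p : Int) + 1)
        * (PySem.Int.floordiv (PySem.Int.floordiv (min x (100 * (p : Int) - 1)) (p : Int)) 10
           + PySem.Int.mod (PySem.Int.floordiv (min x (100 * (p : Int) - 1)) (p : Int)) 10)
    = total + ∑ i ∈ Finset.Ico (10 * p) (min x.toNat (100 * p - 1) + 1), g i := by
  have hp : 0 < p := by subst hpk; positivity
  set topN : Nat := min x.toNat (100 * p - 1) with htopN
  have htop : min x (100 * (p : Int) - 1) = ((topN : Nat) : Int) := by
    simp only [htopN]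
    omega
  have hT : PySem.Int.floordiv (min x (100 * (p : Int) - 1)) (p : Int) = ((topN / p : Nat) : Int) := by
    rw [htop]
    exact PySem.Int.floordiv_natCast topN p
  have htopge : 10 * p ≤ topN := by omega
  have hTge : 10 ≤ topN / p := Nat.le_div_iff_mul_le hp |>.mpr (by omega)
  rw [hT, htop, foldl_pyRange_fdig p total (topN / p) hTge]
  rw [show (10 : Int) = ((10 : Nat) : Int) from rfl, PySem.Int.floordiv_natCast,
    PySem.Int.mod_natCast]
  have hgsum : ∑ i ∈ Finset.Ico (10 * p) (topN + 1), g i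
      = ∑ i ∈ Finset.Ico (10 * p) (topN + 1), fdig (i / p) := by
    apply Finset.sum_congr rfl
    intro i hi
    simp only [Finset.mem_Ico] at hi
    exact g_eq_fdig p k i hpk hi.1 (by omega)
  rw [hgsum, bucket fdig p hp topN htopge]
  have hmod : ((topN : Nat) : Int) - ((topN / p : Nat) : Int) * (p : Int) + 1
      = ((topN % p : Nat) : Int) + 1 := by
    have hdm : ((p : Int)) * ((topN / p : Nat) : Int) + ((topN % p : Nat) : Int)
        = ((topN : Nat) : Int) := by exact_mod_cast Nat.div_add_mod topN p
    rw [mul_comm (((topN / p : Nat) : Int)) ((p : Int))]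
    linarith
  rw [hmod, fdig]
  push_cast
  ring

-- the while-loop accumulates the pointwise sums of all remaining blocks
lemma bLoop_spec (x : Int) (hx : 0 ≤ x) :
    ∀ m p k (hp : 0 < p) total, p = 10 ^ k → x.toNat + 1 - p ≤ m →
      bLoop x p hp total = total + ∑ i ∈ Finset.Ico (10 * p) (x.toNat + 1), g i := by
  intro m
  induction m with
  | zero =>
    intro p k hp total hpk hm
    rw [bLoop]
    rw [dif_neg (by omega)]
    have : Finset.Ico (10 * p) (x.toNat + 1) = ∅ := by
      apply Finset.Ico_eq_empty
      omega
    rw [this]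
    simp
  | succ m ih =>
    intro p k hp total hpk hm
    rw [bLoop]
    by_cases hguard : 10 * (p : Int) ≤ x
    · rw [dif_pos hguard]
      have hpx : 10 * p ≤ x.toNat := by omega
      simp only
      by_cases hnext : 10 * ((10 * p : Nat) : Int) ≤ x
      · -- another block follows: the recursive call handles [100p, x]
        have hrec := ih (10 * p) (k + 1) (by omega)
          ((PySem.List.pyRange 10 (PySem.Int.floordiv (min x (100 * (p:Int) - 1)) (p:Int)) 1).foldl
            (fun a t => a + (p : Int) * (PySem.Int.floordiv t 10 + PySem.Int.mod t 10)) total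
            + (min x (100 * (p:Int) - 1)
                - PySem.Int.floordiv (min x (100 * (p:Int) - 1)) (p:Int) * (p:Int) + 1)
              * (PySem.Int.floordiv (PySem.Int.floordiv (min x (100 * (p:Int) - 1)) (p:Int)) 10
                 + PySem.Int.mod (PySem.Int.floordiv (min x (100 * (p:Int) - 1)) (p:Int)) 10))
          (by rw [hpk]; ring) (by omega)
        rw [hrec, block_eq x p k hpk hpx hx total]
        have h100 : min x.toNat (100 * p - 1) + 1 = 100 * p := by
          push_cast at hnext
          omega
        rw [h100, show (10 : Nat) * (10 * p) = 100 * p by ring,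
          add_assoc, Finset.sum_Ico_consecutive]
        · omega
        · push_cast at hnext; omega
      · -- last block: the recursive call is a no-op
        rw [bLoop, dif_neg hnext]
        rw [block_eq x p k hpk hpx hx total]
        have hlast : min x.toNat (100 * p - 1) + 1 = x.toNat + 1 := by
          push_cast at hnext
          omega
        rw [hlast]
    · rw [dif_neg hguard]
      have : Finset.Ico (10 * p) (x.toNat + 1) = ∅ := by
        apply Finset.Ico_eq_empty
        omega
      rw [this]
      simp

lemma Calc_alt_eq_sum (x : Int) (hx : 10 ≤ x) :
    Calc_alt x = ∑ i ∈ Finset.range (x.toNat + 1), g i := by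
  rw [Calc_alt, if_neg (by omega), if_neg (by omega)]
  rw [bLoop_spec x (by omega) (x.toNat + 1) 1 0 (by omega) 45 (by norm_num) (by omega)]
  have hsplit : ∑ i ∈ Finset.Ico 0 10, g i + ∑ i ∈ Finset.Ico 10 (x.toNat + 1), g i
      = ∑ i ∈ Finset.Ico 0 (x.toNat + 1), g i :=
    Finset.sum_Ico_consecutive g (by omega) (by omega)
  have h45 : ∑ i ∈ Finset.Ico 0 10, g i = 45 := by decide
  rw [Finset.range_eq_Ico, ← hsplit, h45]

-- ===== VERDICT (by name: the statement is the Claim_ definition above) =====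
theorem Calc_spec : Claim_equal_Calc := by
  intro x _
  unfold Spec_Calc
  rcases lt_or_ge x 0 with hneg | hx
  · have hA : Calc x = 0 := by
      rw [Calc]
      have hlt : ¬ (0 : Int) < x + 1 := by omega
      have hpr : PySem.List.pyRange 0 (x + 1) 1 = [] := by
        simp [PySem.List.pyRange, hlt]
      rw [hpr]
      rfl
    rw [hA, Calc_alt, if_pos hneg]
  · rcases lt_or_ge x 10 with hlt | hge
    · interval_cases x <;> decide
    · rw [Calc_eq_sum x hx, Calc_alt_eq_sum x hge]
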